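-- pv_equiv track=rewrite | github.com/ioannes486/pythonDSA | swea/simulation/swea_11673_반사경/solution.py | solve
-- ===== SOURCE A (Python) =====
-- di = [0, 1, 0, -1]
--
-- dj = [1, 0, -1, 0]
--
-- def solve(N, arr):
--
--     reflection_count = 0
--     # 현재 위치의 i,j좌표 초기화
--     i_idx = 0
--     j_idx = 0
--
--     direction_idx = 0  # 처음엔 우측방향
--
--     # 레이저가 배열 안에 있을 때
--     while 0 <= i_idx < N and 0 <= j_idx < N:
--
--         # 전진
--         if arr[i_idx][j_idx] == 0:
--             i_idx += di[direction_idx]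
--             j_idx += dj[direction_idx]
--
--         # 거울 1을 만날 경우
--         elif arr[i_idx][j_idx] == 1:
--             reflection_count += 1
--             # 수평 방향일 경우
--             if direction_idx % 2 == 0:
--                 # 좌회전 하기
--                 direction_idx = (direction_idx + 3) % 4
--             # 수직 방향일 경우
--             else:
--                 # 우회전 하기
--                 direction_idx = (direction_idx + 1) % 4
--             i_idx += di[direction_idx]
--             j_idx += dj[direction_idx]
--
--         # 거울 2를 만날 경우
--         elif arr[i_idx][j_idx] == 2:
--             reflection_count += 1
--
--             # 수평 방향일 경우
--             if direction_idx % 2 == 0: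
--                 # 우회전 하기
--                 direction_idx = (direction_idx + 1) % 4
--
--             # 수직 방향일 경우
--             else:
--                 # 좌회전 하기
--                 direction_idx = (direction_idx + 3) % 4
--             i_idx += di[direction_idx]
--             j_idx += dj[direction_idx]
--
--     return reflection_count
-- ===== SOURCE B (Python) =====
-- def solve(N, arr):
--     # Precompute sorted mirror positions per row and per column, then jump
--     # segment-by-segment from mirror to mirror instead of stepping cell by cell.
--     row_m = [[j for j in range(N) if arr[i][j] != 0] for i in range(N)]
--     col_m = [[i for i in range(N) if arr[i][j] != 0] for j in range(N)]
--     count = 0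
--     i, j, d = 0, 0, 0  # d: 0=right, 1=down, 2=left, 3=up
--     while 0 <= i < N and 0 <= j < N:
--         if d == 0:
--             nxt = next((x for x in row_m[i] if x >= j), None)
--         elif d == 2:
--             nxt = next((x for x in reversed(row_m[i]) if x <= j), None)
--         elif d == 1:
--             nxt = next((x for x in col_m[j] if x >= i), None)
--         else:
--             nxt = next((x for x in reversed(col_m[j]) if x <= i), None)
--         if nxt is None:
--             return count
--         if d % 2 == 0:
--             j = nxt
--         else:
--             i = nxt
--         count += 1
--         d = (3, 2, 1, 0)[d] if arr[i][j] == 1 else (1, 0, 3, 2)[d]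
--         if d == 0:
--             j += 1
--         elif d == 1:
--             i += 1
--         elif d == 2:
--             j -= 1
--         else:
--             i -= 1
--     return count
-- ===== Notes on version B (the rewrite author's own statement) =====
-- stated objective: alternative
-- what changed: B precomputes the sorted mirror positions of every row and column once and then jumps segment-by-segment from mirror to mirror (one iteration per reflection), instead of A's cell-by-cell walk along the whole laser path (intended to skip empty cells; a timing run could not confirm a speed-up).
-- outside the precondition, e.g. on solve(4, [[1, 2], [3], [-3702], [], [88, -8, 4], [1]]): A returns 1, B raises IndexError; on solve(2, [[0, 0], [3, 0]]): A returns 0, B returns 0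
import Mathlib
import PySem

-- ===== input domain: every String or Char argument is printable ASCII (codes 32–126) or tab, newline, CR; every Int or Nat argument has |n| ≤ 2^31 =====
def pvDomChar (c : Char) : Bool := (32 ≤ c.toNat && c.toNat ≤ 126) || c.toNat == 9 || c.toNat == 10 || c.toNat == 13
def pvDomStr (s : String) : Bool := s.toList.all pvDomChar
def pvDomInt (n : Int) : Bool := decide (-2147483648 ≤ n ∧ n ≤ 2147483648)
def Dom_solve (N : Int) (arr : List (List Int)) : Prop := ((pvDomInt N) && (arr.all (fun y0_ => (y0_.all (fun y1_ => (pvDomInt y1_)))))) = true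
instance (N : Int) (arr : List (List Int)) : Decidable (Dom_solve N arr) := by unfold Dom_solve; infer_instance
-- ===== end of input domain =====

-- B replaces A's cell-by-cell walk with precomputed per-row/per-column mirror lists and
-- segment jumps from mirror to mirror (objective: alternative traversal; exact same result).

-- ===== PORT A =====
-- arr[i][j]; both indices are in range on every admitted input (Pre_solve)
def pvCell (arr : List (List Int)) (i j : Int) : Int :=
  PySem.List.pyGetD (PySem.List.pyGetD arr i []) j 0

def pvDi : List Int := [0, 1, 0, -1]
def pvDj : List Int := [1, 0, -1, 0]

-- A's while loop; the fuel (one unit per loop iteration) only makes the port total: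
-- under Pre_solve the Python loop performs at most 4*N*N iterations (each in-bounds
-- (i,j,direction) state occurs at most once), so the fuel `solve` passes never runs out.
-- An in-range cell outside {0,1,2} makes the Python loop spin forever; the port burns
-- fuel in place there, and Pre_solve excludes those grids.
def loopA (N : Int) (arr : List (List Int)) : Nat → Int → Int → Int → Int → Int
  | 0, _, _, _, c => c
  | f+1, i, j, d, c =>
    if 0 ≤ i ∧ i < N ∧ 0 ≤ j ∧ j < N then
      if pvCell arr i j = 0 then
        loopA N arr f (i + PySem.List.pyGetD pvDi d 0) (j + PySem.List.pyGetD pvDj d 0) d c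
      else if pvCell arr i j = 1 then
        let d' := if PySem.Int.mod d 2 = 0 then PySem.Int.mod (d+3) 4 else PySem.Int.mod (d+1) 4
        loopA N arr f (i + PySem.List.pyGetD pvDi d' 0) (j + PySem.List.pyGetD pvDj d' 0) d' (c+1)
      else if pvCell arr i j = 2 then
        let d' := if PySem.Int.mod d 2 = 0 then PySem.Int.mod (d+1) 4 else PySem.Int.mod (d+3) 4
        loopA N arr f (i + PySem.List.pyGetD pvDi d' 0) (j + PySem.List.pyGetD pvDj d' 0) d' (c+1)
      else loopA N arr f i j d c
    else c

def solve (N : Int) (arr : List (List Int)) : Int :=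
  loopA N arr (4*N*N+4).toNat 0 0 0 0

-- ===== PORT B =====
-- row_m = [[j for j in range(N) if arr[i][j] != 0] for i in range(N)]
def pvRowM (N : Int) (arr : List (List Int)) : List (List Int) :=
  (PySem.List.pyRange 0 N 1).map
    (fun i => (PySem.List.pyRange 0 N 1).filter (fun j => pvCell arr i j != 0))

-- col_m = [[i for i in range(N) if arr[i][j] != 0] for j in range(N)]
def pvColM (N : Int) (arr : List (List Int)) : List (List Int) :=
  (PySem.List.pyRange 0 N 1).map
    (fun j => (PySem.List.pyRange 0 N 1).filter (fun i => pvCell arr i j != 0))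

def pvRefl1 : List Int := [3, 2, 1, 0]
def pvRefl2 : List Int := [1, 0, 3, 2]

-- B's while loop: one iteration per reflection; `next((x for x in … if …), None)` is find?.
-- The fuel only makes the port total; it is measured in cells travelled (k+1 per segment,
-- the same unit as loopA's) and the amount `solve_alt` passes never runs out under Pre_solve.
def loopB (N : Int) (arr : List (List Int)) (rowm colm : List (List Int)) :
    Nat → Int → Int → Int → Int → Int
  | 0, _, _, _, c => c
  | f+1, i, j, d, c =>
    if 0 ≤ i ∧ i < N ∧ 0 ≤ j ∧ j < N then
      let nxt : Option Int :=
        if d = 0 then (PySem.List.pyGetD rowm i []).find? (fun x => j ≤ x)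
        else if d = 2 then (PySem.List.pyGetD rowm i []).reverse.find? (fun x => x ≤ j)
        else if d = 1 then (PySem.List.pyGetD colm j []).find? (fun x => i ≤ x)
        else (PySem.List.pyGetD colm j []).reverse.find? (fun x => x ≤ i)
      match nxt with
      | none => c
      | some m =>
        let k : Nat := if PySem.Int.mod d 2 = 0 then (m - j).natAbs else (m - i).natAbs
        if f + 1 ≤ k then c
        else
          let i1 := if PySem.Int.mod d 2 = 0 then i else m
          let j1 := if PySem.Int.mod d 2 = 0 then m else j
          let d' := if pvCell arr i1 j1 = 1 then PySem.List.pyGetD pvRefl1 d 0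
                    else PySem.List.pyGetD pvRefl2 d 0
          let i2 := if d' = 1 then i1 + 1 else if d' = 3 then i1 - 1 else i1
          let j2 := if d' = 0 then j1 + 1 else if d' = 2 then j1 - 1 else j1
          loopB N arr rowm colm (f - k) i2 j2 d' (c+1)
    else c
  termination_by f _ _ _ _ => f
  decreasing_by omega

def solve_alt (N : Int) (arr : List (List Int)) : Int :=
  loopB N arr (pvRowM N arr) (pvColM N arr) (4*N*N+4).toNat 0 0 0 0

-- ===== PRECONDITION & SPEC =====
-- Pre_solve restricts to well-formed mirror grids: the first N rows exist, have at
-- least N columns, and every cell of the N×N area is 0, 1 or 2.  On a grid whose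
-- reached cells leave that set the Python A loops forever, and on a ragged grid A
-- raises IndexError as soon as the laser reaches a missing cell; requiring the full
-- N×N area (a grid that is ragged or has a bad value only where the laser never
-- goes is also excluded, though A returns there and B, which scans the whole N×N
-- area up front, raises or would differ) is the only closed-form reading — which
-- cells are reached can only be known by running the simulation.
def Pre_solve (N : Int) (arr : List (List Int)) : Prop :=
  N ≤ (arr.length : Int) ∧
  ∀ row ∈ arr.take N.toNat, N ≤ (row.length : Int) ∧
    ∀ v ∈ row.take N.toNat, v = 0 ∨ v = 1 ∨ v = 2
instance (N : Int) (arr : List (List Int)) : Decidable (Pre_solve N arr) := by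
  unfold Pre_solve; infer_instance

def pvWitness_solve : Int × List (List Int) := (2, [[0, 1], [2, 0]])

def Spec_solve (N : Int) (arr : List (List Int)) (out : Int) : Prop := out = solve_alt N arr
instance (N : Int) (arr : List (List Int)) (out : Int) : Decidable (Spec_solve N arr out) := by
  unfold Spec_solve; infer_instance

-- ===== CLAIM (what is proved, stated in full; the proofs are below) =====
def Claim_equal_solve : Prop := ∀ (N : Int) (arr : List (List Int)),
  Dom_solve N arr → Pre_solve N arr → Spec_solve N arr (solve N arr)

-- ===== LEMMAS AND PROOFS =====

-- concrete direction-table and turn-table lookups, used once d is a literal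
theorem pvDi0 : PySem.List.pyGetD pvDi (0:Int) 0 = 0 := by decide
theorem pvDi1 : PySem.List.pyGetD pvDi (1:Int) 0 = 1 := by decide
theorem pvDi2 : PySem.List.pyGetD pvDi (2:Int) 0 = 0 := by decide
theorem pvDi3 : PySem.List.pyGetD pvDi (3:Int) 0 = -1 := by decide
theorem pvDj0 : PySem.List.pyGetD pvDj (0:Int) 0 = 1 := by decide
theorem pvDj1 : PySem.List.pyGetD pvDj (1:Int) 0 = 0 := by decide
theorem pvDj2 : PySem.List.pyGetD pvDj (2:Int) 0 = -1 := by decide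
theorem pvDj3 : PySem.List.pyGetD pvDj (3:Int) 0 = 0 := by decide
theorem pvR10 : PySem.List.pyGetD pvRefl1 (0:Int) 0 = 3 := by decide
theorem pvR11 : PySem.List.pyGetD pvRefl1 (1:Int) 0 = 2 := by decide
theorem pvR12 : PySem.List.pyGetD pvRefl1 (2:Int) 0 = 1 := by decide
theorem pvR13 : PySem.List.pyGetD pvRefl1 (3:Int) 0 = 0 := by decide
theorem pvR20 : PySem.List.pyGetD pvRefl2 (0:Int) 0 = 1 := by decide
theorem pvR21 : PySem.List.pyGetD pvRefl2 (1:Int) 0 = 0 := by decide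
theorem pvR22 : PySem.List.pyGetD pvRefl2 (2:Int) 0 = 3 := by decide
theorem pvR23 : PySem.List.pyGetD pvRefl2 (3:Int) 0 = 2 := by decide

theorem pv_cell_mem {N : Int} {arr : List (List Int)} (h : Pre_solve N arr) {i j : Int}
    (hi : 0 ≤ i) (hi2 : i < N) (hj : 0 ≤ j) (hj2 : j < N) :
    pvCell arr i j = 0 ∨ pvCell arr i j = 1 ∨ pvCell arr i j = 2 := by
  obtain ⟨hN, hrows⟩ := h
  have hrow : PySem.List.pyGetD arr i [] = arr[i.toNat]'(by omega) :=
    PySem.List.pyGetD_eq_getElem arr [] hi (by omega)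
  have hmem : arr[i.toNat]'(by omega) ∈ arr.take N.toNat := by
    have h1 : i.toNat < (arr.take N.toNat).length := by simp; omega
    have h2 : (arr.take N.toNat)[i.toNat]'h1 = arr[i.toNat]'(by omega) := List.getElem_take
    exact h2 ▸ List.getElem_mem h1
  obtain ⟨hlen, hvals⟩ := hrows _ hmem
  have hcell : pvCell arr i j = (arr[i.toNat]'(by omega))[j.toNat]'(by omega) := by
    rw [pvCell, hrow]; exact PySem.List.pyGetD_eq_getElem _ 0 hj (by omega)
  have hmem2 : (arr[i.toNat]'(by omega))[j.toNat]'(by omega) ∈ (arr[i.toNat]'(by omega)).take N.toNat := by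
    have h1 : j.toNat < ((arr[i.toNat]'(by omega)).take N.toNat).length := by simp; omega
    have h2 : ((arr[i.toNat]'(by omega)).take N.toNat)[j.toNat]'h1 = (arr[i.toNat]'(by omega))[j.toNat]'(by omega) :=
      List.getElem_take
    exact h2 ▸ List.getElem_mem h1
  rw [hcell]; exact hvals _ hmem2

-- find? on a Pairwise-r list returns an r-minimal match
theorem pv_find_first {r : Int → Int → Prop} :
    ∀ {l : List Int} {p : Int → Bool} {m : Int}, l.Pairwise r → l.find? p = some m →
      ∀ x ∈ l, p x = true → m = x ∨ r m x := by
  intro l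
  induction l with
  | nil => intro p m _ hf; simp at hf
  | cons a t ih =>
    intro p m hp hf
    rcases List.pairwise_cons.mp hp with ⟨ha, ht⟩
    by_cases hpa : p a = true
    · rw [List.find?_cons_of_pos hpa] at hf
      intro x hx hpx
      rcases List.mem_cons.mp hx with rfl | hx'
      · left; cases hf; rfl
      · right; cases hf; exact ha x hx'
    · rw [List.find?_cons_of_neg (by simpa using hpa)] at hf
      intro x hx hpx
      rcases List.mem_cons.mp hx with rfl | hx'
      · exact absurd hpx hpa
      · exact ih ht hf x hx' hpx

-- the row list of B: mirrors of row i, sorted ascending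
theorem pv_rowm_get {N : Int} (arr : List (List Int)) {i : Int} (hi : 0 ≤ i) (hiN : i < N) :
    PySem.List.pyGetD (pvRowM N arr) i [] =
      (PySem.List.pyRange 0 N 1).filter (fun j => pvCell arr i j != 0) :=
  PySem.List.pyGetD_map_pyRange_of_nonneg _ N i [] hi hiN

theorem pv_colm_get {N : Int} (arr : List (List Int)) {j : Int} (hj : 0 ≤ j) (hjN : j < N) :
    PySem.List.pyGetD (pvColM N arr) j [] =
      (PySem.List.pyRange 0 N 1).filter (fun i => pvCell arr i j != 0) :=
  PySem.List.pyGetD_map_pyRange_of_nonneg _ N j [] hj hjN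

theorem pv_mem_filter_range {N x : Int} {q : Int → Bool} :
    x ∈ (PySem.List.pyRange 0 N 1).filter q ↔ (0 ≤ x ∧ x < N ∧ q x = true) := by
  simp [List.mem_filter, PySem.List.mem_pyRange_one, and_assoc]

theorem pv_pairwise_rowl {N : Int} {q : Int → Bool} :
    ((PySem.List.pyRange 0 N 1).filter q).Pairwise (· < ·) :=
  (PySem.List.pairwise_lt_pyRange_one 0 N).filter q

theorem pvM02 : PySem.Int.mod (0:Int) 2 = 0 := by decide
theorem pvM12 : PySem.Int.mod (1:Int) 2 = 1 := by decide
theorem pvM22 : PySem.Int.mod (2:Int) 2 = 0 := by decide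
theorem pvM32 : PySem.Int.mod (3:Int) 2 = 1 := by decide
theorem pvM14 : PySem.Int.mod (1:Int) 4 = 1 := by decide
theorem pvM24 : PySem.Int.mod (2:Int) 4 = 2 := by decide
theorem pvM34 : PySem.Int.mod (3:Int) 4 = 3 := by decide
theorem pvM44 : PySem.Int.mod (4:Int) 4 = 0 := by decide
theorem pvM54 : PySem.Int.mod (5:Int) 4 = 1 := by decide
theorem pvM64 : PySem.Int.mod (6:Int) 4 = 2 := by decide

theorem pv_zrun_right {N : Int} {arr : List (List Int)} {i : Int} (hi : 0 ≤ i) (hiN : i < N) :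
    ∀ (f : Nat) (j c : Int), 0 ≤ j → (∀ x, j ≤ x → x < N → pvCell arr i x = 0) →
      loopA N arr f i j 0 c = c := by
  intro f
  induction f with
  | zero => intros; simp [loopA]
  | succ g ihg =>
    intro j c hj hz
    by_cases hjN : j < N
    · have hc : pvCell arr i j = 0 := hz j le_rfl hjN
      simp only [loopA, hc, if_true, pvDi0, pvDj0]
      rw [if_pos ⟨hi, hiN, hj, hjN⟩]
      simp only [add_zero]
      exact ihg (j+1) c (by omega) (fun x hx1 hx2 => hz x (by omega) hx2)
    · simp only [loopA]
      rw [if_neg (by omega)]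

theorem pv_seg_right {N : Int} {arr : List (List Int)} (h : Pre_solve N arr) {i m : Int}
    (hi : 0 ≤ i) (hiN : i < N) (hm0 : 0 ≤ m) (hmN : m < N) (hcm : pvCell arr i m ≠ 0) :
    ∀ (K f : Nat) (j c : Int), j + (K : Int) = m → 0 ≤ j →
      (∀ x, j ≤ x → x < m → pvCell arr i x = 0) →
      loopA N arr f i j 0 c =
        if f ≤ K then c
        else loopA N arr (f - (K+1)) (if pvCell arr i m = 1 then i - 1 else i + 1) m
               (if pvCell arr i m = 1 then 3 else 1) (c+1) := by
  intro K
  induction K with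
  | zero =>
    intro f j c hjm hj hz
    have hje : j = m := by omega
    subst hje
    cases f with
    | zero => simp [loopA]
    | succ g =>
      rcases pv_cell_mem h hi hiN hj hmN with h0 | h1 | h2
      · exact absurd h0 hcm
      · simp only [loopA, h1]
        rw [if_pos ⟨hi, hiN, hj, hmN⟩]
        norm_num [pvM02, pvM34, pvDi3, pvDj3, sub_eq_add_neg]
      · simp only [loopA, h2]
        rw [if_pos ⟨hi, hiN, hj, hmN⟩]
        norm_num [pvM02, pvM14, pvDi1, pvDj1]
  | succ K ihK =>
    intro f j c hjm hj hz
    have hjm' : j < m := by push_cast at hjm ⊢; omega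
    have hc : pvCell arr i j = 0 := hz j le_rfl hjm'
    cases f with
    | zero => simp [loopA]
    | succ g =>
      simp only [loopA, hc, if_true, pvDi0, pvDj0, add_zero]
      rw [if_pos ⟨hi, hiN, hj, by omega⟩]
      rw [ihK g (j+1) c (by push_cast at hjm ⊢; omega) (by omega)
            (fun x hx1 hx2 => hz x (by omega) hx2)]
      have he : g + 1 - (K + 1 + 1) = g - (K + 1) := by omega
      rw [he]
      split_ifs with h1 h2 h3 <;> first | rfl | omega

theorem pv_zrun_left {N : Int} {arr : List (List Int)} {i : Int} (hi : 0 ≤ i) (hiN : i < N) :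
    ∀ (f : Nat) (j c : Int), j < N → (∀ x, 0 ≤ x → x ≤ j → pvCell arr i x = 0) →
      loopA N arr f i j 2 c = c := by
  intro f
  induction f with
  | zero => intros; simp [loopA]
  | succ g ihg =>
    intro j c hjN hz
    by_cases hj : 0 ≤ j
    · have hc : pvCell arr i j = 0 := hz j hj le_rfl
      simp only [loopA, hc, if_true, pvDi2, pvDj2, add_zero]
      rw [if_pos ⟨hi, hiN, hj, hjN⟩]
      have he : j + -1 = j - 1 := by ring
      rw [he]
      exact ihg (j-1) c (by omega) (fun x hx1 hx2 => hz x hx1 (by omega))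
    · simp only [loopA]
      rw [if_neg (by omega)]

theorem pv_seg_left {N : Int} {arr : List (List Int)} (h : Pre_solve N arr) {i m : Int}
    (hi : 0 ≤ i) (hiN : i < N) (hm0 : 0 ≤ m) (hmN : m < N) (hcm : pvCell arr i m ≠ 0) :
    ∀ (K f : Nat) (j c : Int), j - (K : Int) = m → j < N →
      (∀ x, m < x → x ≤ j → pvCell arr i x = 0) →
      loopA N arr f i j 2 c =
        if f ≤ K then c
        else loopA N arr (f - (K+1)) (if pvCell arr i m = 1 then i + 1 else i - 1) m
               (if pvCell arr i m = 1 then 1 else 3) (c+1) := by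
  intro K
  induction K with
  | zero =>
    intro f j c hjm hjN hz
    have hje : j = m := by omega
    subst hje
    cases f with
    | zero => simp [loopA]
    | succ g =>
      rcases pv_cell_mem h hi hiN hm0 hjN with h0 | h1 | h2
      · exact absurd h0 hcm
      · simp only [loopA, h1]
        rw [if_pos ⟨hi, hiN, hm0, hjN⟩]
        norm_num [pvM22, pvM54, pvDi1, pvDj1]
      · simp only [loopA, h2]
        rw [if_pos ⟨hi, hiN, hm0, hjN⟩]
        norm_num [pvM22, pvM34, pvDi3, pvDj3, sub_eq_add_neg]
  | succ K ihK =>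
    intro f j c hjm hjN hz
    have hjm' : m < j := by push_cast at hjm ⊢; omega
    have hc : pvCell arr i j = 0 := hz j hjm' le_rfl
    cases f with
    | zero => simp [loopA]
    | succ g =>
      simp only [loopA, hc, if_true, pvDi2, pvDj2, add_zero]
      rw [if_pos ⟨hi, hiN, by omega, hjN⟩]
      have he : j + -1 = j - 1 := by ring
      rw [he]
      rw [ihK g (j-1) c (by push_cast at hjm ⊢; omega) (by omega)
            (fun x hx1 hx2 => hz x hx1 (by omega))]
      have he2 : g + 1 - (K + 1 + 1) = g - (K + 1) := by omega
      rw [he2]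
      split_ifs with h1 h2 h3 <;> first | rfl | omega

theorem pv_zrun_down {N : Int} {arr : List (List Int)} {j : Int} (hj : 0 ≤ j) (hjN : j < N) :
    ∀ (f : Nat) (i c : Int), 0 ≤ i → (∀ x, i ≤ x → x < N → pvCell arr x j = 0) →
      loopA N arr f i j 1 c = c := by
  intro f
  induction f with
  | zero => intros; simp [loopA]
  | succ g ihg =>
    intro i c hi hz
    by_cases hiN : i < N
    · have hc : pvCell arr i j = 0 := hz i le_rfl hiN
      simp only [loopA, hc, if_true, pvDi1, pvDj1, add_zero]
      rw [if_pos ⟨hi, hiN, hj, hjN⟩]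
      exact ihg (i+1) c (by omega) (fun x hx1 hx2 => hz x (by omega) hx2)
    · simp only [loopA]
      rw [if_neg (by omega)]

theorem pv_seg_down {N : Int} {arr : List (List Int)} (h : Pre_solve N arr) {j m : Int}
    (hj : 0 ≤ j) (hjN : j < N) (hm0 : 0 ≤ m) (hmN : m < N) (hcm : pvCell arr m j ≠ 0) :
    ∀ (K f : Nat) (i c : Int), i + (K : Int) = m → 0 ≤ i →
      (∀ x, i ≤ x → x < m → pvCell arr x j = 0) →
      loopA N arr f i j 1 c =
        if f ≤ K then c
        else loopA N arr (f - (K+1)) m (if pvCell arr m j = 1 then j - 1 else j + 1)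
               (if pvCell arr m j = 1 then 2 else 0) (c+1) := by
  intro K
  induction K with
  | zero =>
    intro f i c him hi hz
    have hie : i = m := by omega
    subst hie
    cases f with
    | zero => simp [loopA]
    | succ g =>
      rcases pv_cell_mem h hi hmN hj hjN with h0 | h1 | h2
      · exact absurd h0 hcm
      · simp only [loopA, h1]
        rw [if_pos ⟨hi, hmN, hj, hjN⟩]
        norm_num [pvM12, pvM24, pvDi2, pvDj2, sub_eq_add_neg]
      · simp only [loopA, h2]
        rw [if_pos ⟨hi, hmN, hj, hjN⟩]
        norm_num [pvM12, pvM44, pvDi0, pvDj0]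
  | succ K ihK =>
    intro f i c him hi hz
    have him' : i < m := by push_cast at him ⊢; omega
    have hc : pvCell arr i j = 0 := hz i le_rfl him'
    cases f with
    | zero => simp [loopA]
    | succ g =>
      simp only [loopA, hc, if_true, pvDi1, pvDj1, add_zero]
      rw [if_pos ⟨hi, by omega, hj, hjN⟩]
      rw [ihK g (i+1) c (by push_cast at him ⊢; omega) (by omega)
            (fun x hx1 hx2 => hz x (by omega) hx2)]
      have he2 : g + 1 - (K + 1 + 1) = g - (K + 1) := by omega
      rw [he2]
      split_ifs with h1 h2 h3 <;> first | rfl | omega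

theorem pv_zrun_up {N : Int} {arr : List (List Int)} {j : Int} (hj : 0 ≤ j) (hjN : j < N) :
    ∀ (f : Nat) (i c : Int), i < N → (∀ x, 0 ≤ x → x ≤ i → pvCell arr x j = 0) →
      loopA N arr f i j 3 c = c := by
  intro f
  induction f with
  | zero => intros; simp [loopA]
  | succ g ihg =>
    intro i c hiN hz
    by_cases hi : 0 ≤ i
    · have hc : pvCell arr i j = 0 := hz i hi le_rfl
      simp only [loopA, hc, if_true, pvDi3, pvDj3, add_zero]
      rw [if_pos ⟨hi, hiN, hj, hjN⟩]
      have he : i + -1 = i - 1 := by ring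
      rw [he]
      exact ihg (i-1) c (by omega) (fun x hx1 hx2 => hz x hx1 (by omega))
    · simp only [loopA]
      rw [if_neg (by omega)]

theorem pv_seg_up {N : Int} {arr : List (List Int)} (h : Pre_solve N arr) {j m : Int}
    (hj : 0 ≤ j) (hjN : j < N) (hm0 : 0 ≤ m) (hmN : m < N) (hcm : pvCell arr m j ≠ 0) :
    ∀ (K f : Nat) (i c : Int), i - (K : Int) = m → i < N →
      (∀ x, m < x → x ≤ i → pvCell arr x j = 0) →
      loopA N arr f i j 3 c =
        if f ≤ K then c
        else loopA N arr (f - (K+1)) m (if pvCell arr m j = 1 then j + 1 else j - 1)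
               (if pvCell arr m j = 1 then 0 else 2) (c+1) := by
  intro K
  induction K with
  | zero =>
    intro f i c him hiN hz
    have hie : i = m := by omega
    subst hie
    cases f with
    | zero => simp [loopA]
    | succ g =>
      rcases pv_cell_mem h hm0 hiN hj hjN with h0 | h1 | h2
      · exact absurd h0 hcm
      · simp only [loopA, h1]
        rw [if_pos ⟨hm0, hiN, hj, hjN⟩]
        norm_num [pvM32, pvM44, pvDi0, pvDj0]
      · simp only [loopA, h2]
        rw [if_pos ⟨hm0, hiN, hj, hjN⟩]
        norm_num [pvM32, pvM64, pvDi2, pvDj2, sub_eq_add_neg]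
  | succ K ihK =>
    intro f i c him hiN hz
    have him' : m < i := by push_cast at him ⊢; omega
    have hc : pvCell arr i j = 0 := hz i him' le_rfl
    cases f with
    | zero => simp [loopA]
    | succ g =>
      simp only [loopA, hc, if_true, pvDi3, pvDj3, add_zero]
      rw [if_pos ⟨by omega, hiN, hj, hjN⟩]
      have he : i + -1 = i - 1 := by ring
      rw [he]
      rw [ihK g (i-1) c (by push_cast at him ⊢; omega) (by omega)
            (fun x hx1 hx2 => hz x hx1 (by omega))]
      have he2 : g + 1 - (K + 1 + 1) = g - (K + 1) := by omega
      rw [he2]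
      split_ifs with h1 h2 h3 <;> first | rfl | omega


theorem solve_main (N : Int) (arr : List (List Int)) (h : Pre_solve N arr) :
    ∀ f i j d c, (d = 0 ∨ d = 1 ∨ d = 2 ∨ d = 3) →
      loopA N arr f i j d c = loopB N arr (pvRowM N arr) (pvColM N arr) f i j d c := by
  intro f
  induction f using Nat.strong_induction_on with
  | _ f ih =>
  intro i j d c hd
  match f with
  | 0 => simp [loopA, loopB]
  | g+1 =>
  by_cases hb : 0 ≤ i ∧ i < N ∧ 0 ≤ j ∧ j < N
  · obtain ⟨hi, hiN, hj, hjN⟩ := hb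
    rcases hd with rfl | rfl | rfl | rfl
    · -- d = 0 : rightwards
      rcases hR : ((PySem.List.pyRange 0 N 1).filter (fun x => pvCell arr i x != 0)).find?
          (fun x => j ≤ x) with _ | m
      · have hz : ∀ x, j ≤ x → x < N → pvCell arr i x = 0 := by
          intro x hx1 hx2
          by_contra hc
          have hmem : x ∈ (PySem.List.pyRange 0 N 1).filter (fun y => pvCell arr i y != 0) :=
            pv_mem_filter_range.mpr ⟨by omega, hx2, by simp [hc]⟩
          have := List.find?_eq_none.mp hR x hmem
          simp [hx1] at this
        rw [pv_zrun_right hi hiN (g+1) j c hj hz]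
        rw [loopB]
        rw [if_pos ⟨hi, hiN, hj, hjN⟩]
        simp only [Int.reduceEq, reduceIte, pv_rowm_get arr hi hiN, hR]
      · have hpm : j ≤ m := by
          have := List.find?_some hR; simpa using this
        obtain ⟨hm0, hmN, hcm'⟩ := pv_mem_filter_range.mp (List.mem_of_find?_eq_some hR)
        have hcm : pvCell arr i m ≠ 0 := by simpa using hcm'
        have hfirst : ∀ x, j ≤ x → x < m → pvCell arr i x = 0 := by
          intro x hx1 hx2
          by_contra hc
          have hmem : x ∈ (PySem.List.pyRange 0 N 1).filter (fun y => pvCell arr i y != 0) :=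
            pv_mem_filter_range.mpr ⟨by omega, by omega, by simp [hc]⟩
          rcases pv_find_first pv_pairwise_rowl hR x hmem (by simpa using hx1) with rfl | hlt
          · omega
          · omega
        rw [loopB]
        rw [if_pos ⟨hi, hiN, hj, hjN⟩]
        simp only [Int.reduceEq, reduceIte, pv_rowm_get arr hi hiN, hR, pvM02, pvR10, pvR20]
        rw [pv_seg_right h hi hiN hm0 hmN hcm (m - j).toNat (g+1) j c (by omega) hj hfirst]
        have hKabs : (m - j).natAbs = (m - j).toNat := by omega
        rw [hKabs]
        by_cases hfuel : g + 1 ≤ (m - j).toNat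
        · simp only [if_pos hfuel]
        · simp only [if_neg hfuel]
          have he : g + 1 - ((m - j).toNat + 1) = g - (m - j).toNat := by omega
          rw [he]
          rcases pv_cell_mem h hi hiN hm0 hmN with h0 | h1 | h2
          · exact absurd h0 hcm
          · simp only [h1, reduceIte]
            exact ih _ (by omega) _ _ _ _ (by omega)
          · simp only [h2]
            norm_num
            exact ih _ (by omega) _ _ _ _ (by omega)
    · -- d = 1 : downwards
      rcases hR : ((PySem.List.pyRange 0 N 1).filter (fun x => pvCell arr x j != 0)).find?
          (fun x => i ≤ x) with _ | m
      · have hz : ∀ x, i ≤ x → x < N → pvCell arr x j = 0 := by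
          intro x hx1 hx2
          by_contra hc
          have hmem : x ∈ (PySem.List.pyRange 0 N 1).filter (fun y => pvCell arr y j != 0) :=
            pv_mem_filter_range.mpr ⟨by omega, hx2, by simp [hc]⟩
          have := List.find?_eq_none.mp hR x hmem
          simp [hx1] at this
        rw [pv_zrun_down hj hjN (g+1) i c hi hz]
        rw [loopB]
        rw [if_pos ⟨hi, hiN, hj, hjN⟩]
        simp only [Int.reduceEq, reduceIte, pv_colm_get arr hj hjN, hR]
      · have hpm : i ≤ m := by
          have := List.find?_some hR; simpa using this
        obtain ⟨hm0, hmN, hcm'⟩ := pv_mem_filter_range.mp (List.mem_of_find?_eq_some hR)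
        have hcm : pvCell arr m j ≠ 0 := by simpa using hcm'
        have hfirst : ∀ x, i ≤ x → x < m → pvCell arr x j = 0 := by
          intro x hx1 hx2
          by_contra hc
          have hmem : x ∈ (PySem.List.pyRange 0 N 1).filter (fun y => pvCell arr y j != 0) :=
            pv_mem_filter_range.mpr ⟨by omega, by omega, by simp [hc]⟩
          rcases pv_find_first pv_pairwise_rowl hR x hmem (by simpa using hx1) with rfl | hlt
          · omega
          · omega
        rw [loopB]
        rw [if_pos ⟨hi, hiN, hj, hjN⟩]
        simp only [Int.reduceEq, reduceIte, pv_colm_get arr hj hjN, hR, pvM12, pvR11, pvR21]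
        rw [pv_seg_down h hj hjN hm0 hmN hcm (m - i).toNat (g+1) i c (by omega) hi hfirst]
        have hKabs : (m - i).natAbs = (m - i).toNat := by omega
        rw [hKabs]
        by_cases hfuel : g + 1 ≤ (m - i).toNat
        · simp only [if_pos hfuel]
        · simp only [if_neg hfuel]
          have he : g + 1 - ((m - i).toNat + 1) = g - (m - i).toNat := by omega
          rw [he]
          rcases pv_cell_mem h hm0 hmN hj hjN with h0 | h1 | h2
          · exact absurd h0 hcm
          · simp only [h1, reduceIte]
            exact ih _ (by omega) _ _ _ _ (by omega)
          · simp only [h2]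
            norm_num
            exact ih _ (by omega) _ _ _ _ (by omega)
    · -- d = 2 : leftwards
      rcases hR : ((PySem.List.pyRange 0 N 1).filter (fun x => pvCell arr i x != 0)).reverse.find?
          (fun x => x ≤ j) with _ | m
      · have hz : ∀ x, 0 ≤ x → x ≤ j → pvCell arr i x = 0 := by
          intro x hx1 hx2
          by_contra hc
          have hmem : x ∈ ((PySem.List.pyRange 0 N 1).filter (fun y => pvCell arr i y != 0)).reverse :=
            List.mem_reverse.mpr (pv_mem_filter_range.mpr ⟨hx1, by omega, by simp [hc]⟩)
          have := List.find?_eq_none.mp hR x hmem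
          simp [hx2] at this
        rw [pv_zrun_left hi hiN (g+1) j c hjN hz]
        rw [loopB]
        rw [if_pos ⟨hi, hiN, hj, hjN⟩]
        simp only [Int.reduceEq, reduceIte, pv_rowm_get arr hi hiN, hR]
      · have hpm : m ≤ j := by
          have := List.find?_some hR; simpa using this
        obtain ⟨hm0, hmN, hcm'⟩ :=
          pv_mem_filter_range.mp (List.mem_reverse.mp (List.mem_of_find?_eq_some hR))
        have hcm : pvCell arr i m ≠ 0 := by simpa using hcm'
        have hpair : ((PySem.List.pyRange 0 N 1).filter (fun y => pvCell arr i y != 0)).reverse.Pairwise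
            (fun a b => b < a) := List.pairwise_reverse.mpr pv_pairwise_rowl
        have hfirst : ∀ x, m < x → x ≤ j → pvCell arr i x = 0 := by
          intro x hx1 hx2
          by_contra hc
          have hmem : x ∈ ((PySem.List.pyRange 0 N 1).filter (fun y => pvCell arr i y != 0)).reverse :=
            List.mem_reverse.mpr (pv_mem_filter_range.mpr ⟨by omega, by omega, by simp [hc]⟩)
          rcases pv_find_first hpair hR x hmem (by simpa using hx2) with rfl | hlt
          · omega
          · omega
        rw [loopB]
        rw [if_pos ⟨hi, hiN, hj, hjN⟩]
        simp only [Int.reduceEq, reduceIte, pv_rowm_get arr hi hiN, hR, pvM22, pvR12, pvR22]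
        rw [pv_seg_left h hi hiN hm0 hmN hcm (j - m).toNat (g+1) j c (by omega) hjN hfirst]
        have hKabs : (m - j).natAbs = (j - m).toNat := by omega
        rw [hKabs]
        by_cases hfuel : g + 1 ≤ (j - m).toNat
        · simp only [if_pos hfuel]
        · simp only [if_neg hfuel]
          have he : g + 1 - ((j - m).toNat + 1) = g - (j - m).toNat := by omega
          rw [he]
          rcases pv_cell_mem h hi hiN hm0 hmN with h0 | h1 | h2
          · exact absurd h0 hcm
          · simp only [h1, reduceIte]
            exact ih _ (by omega) _ _ _ _ (by omega)
          · simp only [h2]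
            norm_num
            exact ih _ (by omega) _ _ _ _ (by omega)
    · -- d = 3 : upwards
      rcases hR : ((PySem.List.pyRange 0 N 1).filter (fun x => pvCell arr x j != 0)).reverse.find?
          (fun x => x ≤ i) with _ | m
      · have hz : ∀ x, 0 ≤ x → x ≤ i → pvCell arr x j = 0 := by
          intro x hx1 hx2
          by_contra hc
          have hmem : x ∈ ((PySem.List.pyRange 0 N 1).filter (fun y => pvCell arr y j != 0)).reverse :=
            List.mem_reverse.mpr (pv_mem_filter_range.mpr ⟨hx1, by omega, by simp [hc]⟩)
          have := List.find?_eq_none.mp hR x hmem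
          simp [hx2] at this
        rw [pv_zrun_up hj hjN (g+1) i c hiN hz]
        rw [loopB]
        rw [if_pos ⟨hi, hiN, hj, hjN⟩]
        simp only [Int.reduceEq, reduceIte, pv_colm_get arr hj hjN, hR]
      · have hpm : m ≤ i := by
          have := List.find?_some hR; simpa using this
        obtain ⟨hm0, hmN, hcm'⟩ :=
          pv_mem_filter_range.mp (List.mem_reverse.mp (List.mem_of_find?_eq_some hR))
        have hcm : pvCell arr m j ≠ 0 := by simpa using hcm'
        have hpair : ((PySem.List.pyRange 0 N 1).filter (fun y => pvCell arr y j != 0)).reverse.Pairwise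
            (fun a b => b < a) := List.pairwise_reverse.mpr pv_pairwise_rowl
        have hfirst : ∀ x, m < x → x ≤ i → pvCell arr x j = 0 := by
          intro x hx1 hx2
          by_contra hc
          have hmem : x ∈ ((PySem.List.pyRange 0 N 1).filter (fun y => pvCell arr y j != 0)).reverse :=
            List.mem_reverse.mpr (pv_mem_filter_range.mpr ⟨by omega, by omega, by simp [hc]⟩)
          rcases pv_find_first hpair hR x hmem (by simpa using hx2) with rfl | hlt
          · omega
          · omega
        rw [loopB]
        rw [if_pos ⟨hi, hiN, hj, hjN⟩]
        simp only [Int.reduceEq, reduceIte, pv_colm_get arr hj hjN, hR, pvM32, pvR13, pvR23]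
        rw [pv_seg_up h hj hjN hm0 hmN hcm (i - m).toNat (g+1) i c (by omega) hiN hfirst]
        have hKabs : (m - i).natAbs = (i - m).toNat := by omega
        rw [hKabs]
        by_cases hfuel : g + 1 ≤ (i - m).toNat
        · simp only [if_pos hfuel]
        · simp only [if_neg hfuel]
          have he : g + 1 - ((i - m).toNat + 1) = g - (i - m).toNat := by omega
          rw [he]
          rcases pv_cell_mem h hm0 hmN hj hjN with h0 | h1 | h2
          · exact absurd h0 hcm
          · simp only [h1, reduceIte]
            exact ih _ (by omega) _ _ _ _ (by omega)
          · simp only [h2]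
            norm_num
            exact ih _ (by omega) _ _ _ _ (by omega)
  · rw [loopA, loopB, if_neg hb, if_neg hb]

-- ===== VERDICT (by name: the statement is the Claim_ definition above) =====
theorem solve_spec : Claim_equal_solve := by
  intro N arr _ hpre
  unfold Spec_solve solve solve_alt
  exact solve_main N arr hpre _ 0 0 0 0 (Or.inl rfl)
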